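-- pv_equiv track=rewrite | github.com/syforcee/LogicEvaluator | PostfixCalc.py | differentByOne
-- ===== SOURCE A (Python) =====
-- def differentByOne(val, list ):
--
--     leng =len(val)
--     result=[]
--     for  piece in list:
--
--         wasDifferent=False
--         differentPlace=-1
--
--         for i in range(leng):
--             if (piece[i] != val[i]) and not wasDifferent and differentPlace==-1:
--                 wasDifferent = True
--                 differentPlace=i
--             elif piece[i] != val[i]:
--                 wasDifferent=False
--
--         if wasDifferent:
--             valCpy=piece[:]
--             str2=''
--             for i in range(leng):
--                 if i!= differentPlace:
--                     str2+=valCpy[i]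
--                 else:
--                     str2+='x'
--
--             result=result+ [str2]
--
--     return result
-- ===== SOURCE B (Python) =====
-- def differentByOne(val, list):
--     leng = len(val)
--     result = []
--     for piece in list:
--         p = piece[:leng]
--         d = 0
--         while d < leng and p[d] == val[d]:
--             d += 1
--         if d < leng and p[d + 1:] == val[d + 1:]:
--             result.append(val[:d] + 'x' + val[d + 1:])
--     return result
-- ===== Notes on version B (the rewrite author's own statement) =====
-- stated objective: alternative
-- what changed: Replaces A's full index-by-index scan with flag bookkeeping plus a separate character-copy loop by a first-mismatch search that stops early, a single slice comparison of the remaining suffixes, and output built from val by slicing (val[:d]+'x'+val[d+1:]) instead of copying piece character by character.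
import Mathlib
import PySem

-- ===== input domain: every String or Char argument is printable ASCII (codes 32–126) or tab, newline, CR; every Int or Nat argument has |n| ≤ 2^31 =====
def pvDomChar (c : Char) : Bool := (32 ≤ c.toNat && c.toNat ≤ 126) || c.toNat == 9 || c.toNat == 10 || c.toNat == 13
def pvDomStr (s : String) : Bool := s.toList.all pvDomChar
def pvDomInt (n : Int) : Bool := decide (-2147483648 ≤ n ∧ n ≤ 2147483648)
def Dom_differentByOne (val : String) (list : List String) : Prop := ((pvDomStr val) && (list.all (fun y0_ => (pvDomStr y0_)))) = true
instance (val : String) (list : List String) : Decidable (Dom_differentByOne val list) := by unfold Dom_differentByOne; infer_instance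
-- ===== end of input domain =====

-- B replaces A's flag-carrying full scan plus char-by-char copy loop with a first-mismatch search, one suffix comparison, and an output built from val by slicing: alternative decomposition, same cost.


-- ===== PORT A =====
-- A's inner detection loop: fold over range(leng) carrying (wasDifferent, differentPlace).
def dboScan (vc pc : List Char) (leng : Nat) : Bool × Int :=
  (PySem.List.pyRange 0 (leng : Int) 1).foldl
    (fun st i =>
      let p := (PySem.List.pyGet? pc i).getD ' '
      let v := (PySem.List.pyGet? vc i).getD ' '
      if p ≠ v ∧ st.1 = false ∧ st.2 = -1 then (true, i)
      else if p ≠ v then (false, st.2)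
      else st)
    (false, -1)

-- A's copy loop building str2 character by character.
def dboCopy (pc : List Char) (leng : Nat) (dp : Int) : List Char :=
  (PySem.List.pyRange 0 (leng : Int) 1).foldl
    (fun s i => if i ≠ dp then s ++ [(PySem.List.pyGet? pc i).getD ' '] else s ++ ['x']) []

def differentByOne (val : String) (list : List String) : List String :=
  let vc := val.toList
  let leng := vc.length
  list.foldl
    (fun result piece =>
      let st := dboScan vc piece.toList leng
      if st.1 then result ++ [String.ofList (dboCopy piece.toList leng st.2)] else result)
    []

-- ===== PORT B =====
def dboFirst (p vc : List Char) (leng d : Nat) : Nat :=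
  if d < leng then
    if (PySem.List.pyGet? p (d : Int)).getD ' ' = (PySem.List.pyGet? vc (d : Int)).getD ' ' then
      dboFirst p vc leng (d + 1)
    else d
  else d
termination_by leng - d

def differentByOne_alt (val : String) (list : List String) : List String :=
  let vc := val.toList
  let leng := vc.length
  list.foldl
    (fun result piece =>
      let p := PySem.List.slice piece.toList none (some (leng : Int))   -- piece[:leng]
      let d := dboFirst p vc leng 0
      if d < leng ∧
          PySem.List.slice p (some ((d + 1 : Nat) : Int)) none
            = PySem.List.slice vc (some ((d + 1 : Nat) : Int)) none     -- p[d+1:] == val[d+1:]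
      then result ++ [String.ofList
             (PySem.List.slice vc none (some ((d : Nat) : Int)) ++
              'x' :: PySem.List.slice vc (some ((d + 1 : Nat) : Int)) none)]  -- val[:d]+'x'+val[d+1:]
      else result)
    []

-- ===== PRECONDITION & SPEC =====
-- Pre_ excludes exactly the inputs where Python A raises IndexError: some piece shorter than val.
def Pre_differentByOne (val : String) (list : List String) : Prop :=
  ∀ piece ∈ list, val.toList.length ≤ piece.toList.length
instance (val : String) (list : List String) : Decidable (Pre_differentByOne val list) := by
  unfold Pre_differentByOne; infer_instance

def pvWitness_differentByOne : String × List String := ("ab", ["aa", "ab", "cb"])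

def Spec_differentByOne (val : String) (list : List String) (out : List String) : Prop := out = differentByOne_alt val list
instance (val : String) (list : List String) (out : List String) : Decidable (Spec_differentByOne val list out) := by unfold Spec_differentByOne; infer_instance

-- ===== CLAIM (what is proved, stated in full; the proofs are below) =====
def Claim_equal_differentByOne : Prop := ∀ (val : String) (list : List String), Dom_differentByOne val list → Pre_differentByOne val list → Spec_differentByOne val list (differentByOne val list)

-- ===== LEMMAS AND PROOFS =====

def dboF : List Int → Bool × Int
  | [] => (false, -1)
  | [d] => (true, d)
  | d :: _ :: _ => (false, d)

theorem dboScan_step (vc pc : List Char) (D : Int → Bool)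
    (hD : ∀ i, D i = decide ((PySem.List.pyGet? pc i).getD ' ' ≠ (PySem.List.pyGet? vc i).getD ' '))
    (l ds : List Int) (hds : ∀ i ∈ ds, 0 ≤ i) (hl : ∀ i ∈ l, 0 ≤ i) :
    l.foldl
      (fun st i =>
        let p := (PySem.List.pyGet? pc i).getD ' '
        let v := (PySem.List.pyGet? vc i).getD ' '
        if p ≠ v ∧ st.1 = false ∧ st.2 = -1 then (true, i)
        else if p ≠ v then (false, st.2)
        else st)
      (dboF ds) = dboF (ds ++ l.filter D) := by
  induction l generalizing ds with
  | nil => simp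
  | cons i l ih =>
    have hi : (0:Int) ≤ i := hl i (by simp)
    have hl' : ∀ j ∈ l, 0 ≤ j := fun j hj => hl j (by simp [hj])
    by_cases hd : (PySem.List.pyGet? pc i).getD ' ' ≠ (PySem.List.pyGet? vc i).getD ' '
    · have hDi : D i = true := by rw [hD]; simpa using hd
      have hstep : (let p := (PySem.List.pyGet? pc i).getD ' '
          let v := (PySem.List.pyGet? vc i).getD ' '
          if p ≠ v ∧ (dboF ds).1 = false ∧ (dboF ds).2 = -1 then (true, i)
          else if p ≠ v then (false, (dboF ds).2)
          else dboF ds) = dboF (ds ++ [i]) := by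
        match ds with
        | [] => simp [dboF, hd]
        | [d] => simp [dboF, hd]
        | d :: e :: rest =>
          have hd0 : (0:Int) ≤ d := hds d (by simp)
          have : ¬ (d = -1) := by omega
          simp [dboF, hd, this]
      rw [List.foldl_cons, hstep, ih (ds ++ [i])
        (by intro j hj; rcases List.mem_append.1 hj with h | h
            · exact hds j h
            · simp at h; omega) hl']
      simp [hDi]
    · have hDi : D i = false := by rw [hD]; simpa using hd
      have hstep : (let p := (PySem.List.pyGet? pc i).getD ' '
          let v := (PySem.List.pyGet? vc i).getD ' '
          if p ≠ v ∧ (dboF ds).1 = false ∧ (dboF ds).2 = -1 then (true, i)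
          else if p ≠ v then (false, (dboF ds).2)
          else dboF ds) = dboF ds := by
        simp [hd]
      rw [List.foldl_cons, hstep, ih ds hds hl']
      simp [hDi]

theorem dboScan_eq (vc pc : List Char) (leng : Nat) :
    dboScan vc pc leng =
    dboF ((PySem.List.pyRange 0 (leng : Int) 1).filter
      (fun i => (PySem.List.pyGet? pc i).getD ' ' ≠ (PySem.List.pyGet? vc i).getD ' ')) := by
  unfold dboScan
  exact dboScan_step vc pc _ (fun i => rfl) _ [] (by simp)
    (by intro i hi; exact (PySem.List.mem_pyRange_one.1 hi).1)

theorem dboCopy_eq (pc : List Char) (leng : Nat) (d : Int) :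
    dboCopy pc leng d =
    (PySem.List.pyRange 0 (leng : Int) 1).map
      (fun i => if i = d then 'x' else (PySem.List.pyGet? pc i).getD ' ') := by
  unfold dboCopy
  have hstep : (fun (s : List Char) (i : Int) =>
      if i ≠ d then s ++ [(PySem.List.pyGet? pc i).getD ' '] else s ++ ['x'])
      = fun s i => s ++ [if i = d then 'x' else (PySem.List.pyGet? pc i).getD ' '] := by
    funext s i; by_cases h : i = d <;> simp [h]
  rw [hstep, PySem.List.foldl_append_singleton_eq_map]
  simp

theorem dboFirst_spec (p vc : List Char) (leng : Nat) : ∀ d,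
    d ≤ dboFirst p vc leng d ∧ dboFirst p vc leng d ≤ max d leng ∧
    (∀ i, d ≤ i → i < dboFirst p vc leng d →
      (PySem.List.pyGet? p (i : Int)).getD ' ' = (PySem.List.pyGet? vc (i : Int)).getD ' ') ∧
    (dboFirst p vc leng d < leng →
      (PySem.List.pyGet? p ((dboFirst p vc leng d : Nat) : Int)).getD ' '
        ≠ (PySem.List.pyGet? vc ((dboFirst p vc leng d : Nat) : Int)).getD ' ') := by
  intro d
  induction d using dboFirst.induct p vc leng with
  | case1 d hlt heq ih =>
    rw [dboFirst, if_pos hlt, if_pos heq]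
    obtain ⟨h1, h2, h3, h4⟩ := ih
    refine ⟨by omega, by omega, ?_, h4⟩
    intro i hdi hir
    rcases Nat.eq_or_lt_of_le hdi with h | h
    · subst h; exact heq
    · exact h3 i h hir
  | case2 d hlt hne =>
    rw [dboFirst, if_pos hlt, if_neg hne]
    exact ⟨le_refl _, by omega, by omega, fun _ => hne⟩
  | case3 d hge =>
    rw [dboFirst, if_neg hge]
    exact ⟨le_refl _, by omega, by omega, fun h => absurd h hge⟩

theorem pyGetD_getD (l : List Char) (i : Nat) :
    (PySem.List.pyGet? l (i : Int)).getD ' ' = l.getD i ' ' := by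
  rw [PySem.List.pyGet?_natCast, List.getD_eq_getElem?_getD]

theorem map_getD_range (l : List Char) (m n : Nat) (h : m + n ≤ l.length) :
    (List.range n).map (fun i => l.getD (m + i) ' ') = (l.drop m).take n := by
  apply List.ext_getElem
  · simp; omega
  · intro i h1 h2
    simp only [List.getElem_map, List.getElem_range, List.getElem_take, List.getElem_drop]
    simp at h1
    rw [List.getD_eq_getElem?_getD, List.getElem?_eq_getElem (by omega : m + i < l.length)]
    rfl

theorem map_getD_range0 (l : List Char) (n : Nat) (h : n ≤ l.length) :
    (List.range n).map (fun i => l.getD i ' ') = l.take n := by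
  simpa using map_getD_range l 0 n (by omega)

theorem getD_of_drop_eq (q vc : List Char) (m j : Nat) (hd : q.drop m = vc.drop m) :
    q.getD (m + j) ' ' = vc.getD (m + j) ' ' := by
  rw [List.getD_eq_getElem?_getD, List.getD_eq_getElem?_getD,
    ← List.getElem?_drop, ← List.getElem?_drop, hd]

theorem drop_eq_of_getD (q vc : List Char) (hq : q.length = vc.length) (m : Nat)
    (h : ∀ j, m + j < vc.length → q.getD (m + j) ' ' = vc.getD (m + j) ' ') :
    q.drop m = vc.drop m := by
  apply List.ext_getElem?
  intro j
  by_cases hj : m + j < vc.length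
  · rw [List.getElem?_drop, List.getElem?_drop,
      List.getElem?_eq_getElem (by omega : m + j < q.length),
      List.getElem?_eq_getElem (by omega : m + j < vc.length)]
    have := h j hj
    rw [List.getD_eq_getElem?_getD, List.getD_eq_getElem?_getD,
      List.getElem?_eq_getElem (by omega : m + j < q.length),
      List.getElem?_eq_getElem (by omega : m + j < vc.length)] at this
    simpa using this
  · rw [List.getElem?_drop, List.getElem?_drop,
      List.getElem?_eq_none (by omega), List.getElem?_eq_none (by omega)]

theorem range_split (leng d : Nat) (h : d < leng) :
    List.range leng = List.range d ++ d :: (List.range (leng - d - 1)).map (fun j => d + 1 + j) := by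
  obtain ⟨k, hk⟩ : ∃ k, leng = d + (k + 1) := ⟨leng - d - 1, by omega⟩
  subst hk
  have hk2 : d + (k + 1) - d - 1 = k := by omega
  rw [hk2, List.range_add, List.range_succ_eq_map]
  simp only [List.map_cons, List.map_map, Function.comp_def, Nat.add_zero]
  congr 2
  exact List.map_congr_left (fun j _ => by omega)

theorem mask_eq (vc pc : List Char) (d0 : Nat) (hd : d0 < vc.length)
    (heqout : ∀ i : Nat, i < vc.length → i ≠ d0 → pc.getD i ' ' = vc.getD i ' ') :
    (PySem.List.pyRange 0 (vc.length : Int) 1).map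
        (fun i => if i = (d0 : Int) then 'x' else (PySem.List.pyGet? pc i).getD ' ')
      = vc.take d0 ++ 'x' :: vc.drop (d0 + 1) := by
  rw [PySem.List.pyRange_zero_natCast, List.map_map]
  have hfun : ((fun i => if i = (d0 : Int) then 'x' else (PySem.List.pyGet? pc i).getD ' ')
        ∘ fun (k : Nat) => (k : Int))
      = fun (i : Nat) => if i = d0 then 'x' else pc.getD i ' ' := by
    funext i
    simp only [Function.comp_apply, Nat.cast_inj, pyGetD_getD]
  rw [hfun, range_split vc.length d0 hd, List.map_append, List.map_cons, List.map_map]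
  congr 1
  · rw [List.map_congr_left (g := fun i => vc.getD i ' ')
      (fun i hi => by
        have hi' : i < d0 := List.mem_range.1 hi
        rw [if_neg (by omega)]
        exact heqout i (by omega) (by omega))]
    exact map_getD_range0 vc d0 (by omega)
  · rw [if_pos rfl]
    congr 1
    rw [List.map_congr_left (g := fun j => vc.getD (d0 + 1 + j) ' ')
      (fun j hj => by
        have hj' : j < vc.length - d0 - 1 := List.mem_range.1 hj
        simp only [Function.comp_apply]
        rw [if_neg (by omega)]
        exact heqout (d0 + 1 + j) (by omega) (by omega))]
    rw [map_getD_range vc (d0 + 1) (vc.length - d0 - 1) (by omega)]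
    exact List.take_of_length_le (by simp; omega)

theorem dbo_piece_eq (vc pc : List Char) (hlen : vc.length ≤ pc.length) (result : List String) :
    (let st := dboScan vc pc vc.length
     if st.1 then result ++ [String.ofList (dboCopy pc vc.length st.2)] else result)
    =
    (let p := PySem.List.slice pc none (some (vc.length : Int))
     let d := dboFirst p vc vc.length 0
     if d < vc.length ∧
         PySem.List.slice p (some ((d + 1 : Nat) : Int)) none
           = PySem.List.slice vc (some ((d + 1 : Nat) : Int)) none
     then result ++ [String.ofList
            (PySem.List.slice vc none (some ((d : Nat) : Int)) ++
             'x' :: PySem.List.slice vc (some ((d + 1 : Nat) : Int)) none)]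
     else result) := by
  have hq : PySem.List.slice pc none (some ((vc.length : Nat) : Int)) = pc.take vc.length :=
    PySem.List.slice_to_natCast pc vc.length
  simp only [hq]
  obtain ⟨-, hle, hpre, hlast⟩ := dboFirst_spec (pc.take vc.length) vc vc.length 0
  set d0 := dboFirst (pc.take vc.length) vc vc.length 0 with hd0def
  have hle' : d0 ≤ vc.length := by simpa using hle
  have hqlen : (pc.take vc.length).length = vc.length := by simp [hlen]
  have hqc : ∀ i : Nat, i < vc.length →
      (pc.take vc.length).getD i ' ' = pc.getD i ' ' := by
    intro i hi
    rw [List.getD_eq_getElem?_getD, List.getD_eq_getElem?_getD, List.getElem?_take_of_lt hi]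
  have hpre' : ∀ i : Nat, i < d0 → pc.getD i ' ' = vc.getD i ' ' := by
    intro i hi
    have h := hpre i (Nat.zero_le i) hi
    rwa [pyGetD_getD, pyGetD_getD, hqc i (by omega)] at h
  have hlast' : d0 < vc.length → pc.getD d0 ' ' ≠ vc.getD d0 ' ' := by
    intro h
    have h2 := hlast h
    rwa [pyGetD_getD, pyGetD_getD, hqc d0 h] at h2
  rw [dboScan_eq, PySem.List.pyRange_zero_natCast, List.filter_map]
  simp only [Function.comp_def]
  have hP : (fun (k : Nat) => decide ¬(PySem.List.pyGet? pc ((k : Nat) : Int)).getD ' '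
        = (PySem.List.pyGet? vc ((k : Nat) : Int)).getD ' ')
      = fun (k : Nat) => decide ¬pc.getD k ' ' = vc.getD k ' ' := by
    funext k; rw [pyGetD_getD, pyGetD_getD]
  by_cases hcase : d0 < vc.length
  · rw [range_split vc.length d0 hcase, List.filter_append, List.filter_cons, List.filter_map]
    simp only [Function.comp_def]
    have h0 : (List.range d0).filter
        (fun i => decide ((PySem.List.pyGet? pc ((i : Nat) : Int)).getD ' '
          ≠ (PySem.List.pyGet? vc ((i : Nat) : Int)).getD ' ')) = [] := by
      apply List.filter_eq_nil_iff.2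
      intro i hi
      have h := hpre' i (List.mem_range.1 hi)
      rw [List.getD_eq_getElem?_getD, List.getD_eq_getElem?_getD] at h
      simp [h]
    have hPd0 : decide ((PySem.List.pyGet? pc ((d0 : Nat) : Int)).getD ' '
        ≠ (PySem.List.pyGet? vc ((d0 : Nat) : Int)).getD ' ') = true := by
      simp only [pyGetD_getD]
      simpa using hlast' hcase
    rw [h0, hPd0]
    simp only [List.nil_append, if_true]
    set T := (List.range (vc.length - d0 - 1)).filter
      (fun j => decide ((PySem.List.pyGet? pc ((d0 + 1 + j : Nat) : Int)).getD ' '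
        ≠ (PySem.List.pyGet? vc ((d0 + 1 + j : Nat) : Int)).getD ' ')) with hTdef
    have hTnil_iff : T = [] ↔ (pc.take vc.length).drop (d0 + 1) = vc.drop (d0 + 1) := by
      constructor
      · intro hT
        apply drop_eq_of_getD _ _ hqlen (d0 + 1)
        intro j hj
        have hjk : j < vc.length - d0 - 1 := by omega
        have h := List.filter_eq_nil_iff.1 hT j (List.mem_range.2 hjk)
        simp only [pyGetD_getD, not_not, ne_eq, decide_not,
          Bool.not_eq_true', decide_eq_false_iff_not] at h
        rw [hqc (d0 + 1 + j) (by omega)]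
        exact h
      · intro hdrop
        apply List.filter_eq_nil_iff.2
        intro j hj
        have hjk : j < vc.length - d0 - 1 := List.mem_range.1 hj
        have h := getD_of_drop_eq _ _ (d0 + 1) j hdrop
        rw [hqc (d0 + 1 + j) (by omega)] at h
        simp only [decide_eq_true_eq, ne_eq, not_not]
        rw [pyGetD_getD, pyGetD_getD]
        exact h
    have hsl1 : PySem.List.slice (pc.take vc.length) (some ((d0 + 1 : Nat) : Int)) none
        = (pc.take vc.length).drop (d0 + 1) := PySem.List.slice_from_natCast _ _
    have hsl2 : PySem.List.slice vc (some ((d0 + 1 : Nat) : Int)) none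
        = vc.drop (d0 + 1) := PySem.List.slice_from_natCast _ _
    have hsl3 : PySem.List.slice vc none (some ((d0 : Nat) : Int))
        = vc.take d0 := PySem.List.slice_to_natCast _ _
    rw [hsl1, hsl2, hsl3]
    cases hT : T with
    | nil =>
      have hsuf : (pc.take vc.length).drop (d0 + 1) = vc.drop (d0 + 1) := hTnil_iff.1 hT
      have heqout : ∀ i : Nat, i < vc.length → i ≠ d0 → pc.getD i ' ' = vc.getD i ' ' := by
        intro i hi hne
        by_cases hid : i < d0
        · exact hpre' i hid
        · have hjk : i - d0 - 1 < vc.length - d0 - 1 := by omega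
          have h := List.filter_eq_nil_iff.1 hT (i - d0 - 1) (List.mem_range.2 hjk)
          simp only [pyGetD_getD, ne_eq, decide_not, Bool.not_eq_true',
            decide_eq_false_iff_not, not_not] at h
          have hidx : d0 + 1 + (i - d0 - 1) = i := by omega
          rwa [hidx] at h
      simp only [List.map_nil, List.map_cons, dboF, if_true]
      rw [if_pos ⟨hcase, hsuf⟩, dboCopy_eq, mask_eq vc pc d0 hcase heqout]
    | cons t ts =>
      have hsuf : ¬ ((pc.take vc.length).drop (d0 + 1) = vc.drop (d0 + 1)) := by
        intro h
        have : T = [] := hTnil_iff.2 h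
        rw [hT] at this; exact List.cons_ne_nil _ _ this
      simp only [List.map_cons, dboF]
      rw [if_neg (by simp), if_neg (by intro h; exact hsuf h.2)]
  · have hd0 : d0 = vc.length := by omega
    have hnil : (List.range vc.length).filter
        (fun i => decide ((PySem.List.pyGet? pc ((i : Nat) : Int)).getD ' '
          ≠ (PySem.List.pyGet? vc ((i : Nat) : Int)).getD ' ')) = [] := by
      apply List.filter_eq_nil_iff.2
      intro i hi
      simp only [pyGetD_getD, decide_not, Bool.not_eq_true', decide_eq_false_iff_not, not_not]
      exact hpre' i (by rw [hd0]; exact List.mem_range.1 hi)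
    rw [hnil]
    simp [dboF, hd0]

theorem dbo_eq (val : String) (list : List String)
    (hpre : ∀ piece ∈ list, val.toList.length ≤ piece.toList.length) :
    differentByOne val list = differentByOne_alt val list := by
  unfold differentByOne differentByOne_alt
  simp only
  suffices h : ∀ (l : List String) (result : List String),
      (∀ piece ∈ l, val.toList.length ≤ piece.toList.length) →
      l.foldl (fun result piece =>
        let st := dboScan val.toList piece.toList val.toList.length
        if st.1 then result ++ [String.ofList (dboCopy piece.toList val.toList.length st.2)] else result) result
      = l.foldl (fun result piece =>
        let p := PySem.List.slice piece.toList none (some (val.toList.length : Int))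
        let d := dboFirst p val.toList val.toList.length 0
        if d < val.toList.length ∧
            PySem.List.slice p (some ((d + 1 : Nat) : Int)) none
              = PySem.List.slice val.toList (some ((d + 1 : Nat) : Int)) none
        then result ++ [String.ofList
               (PySem.List.slice val.toList none (some ((d : Nat) : Int)) ++
                'x' :: PySem.List.slice val.toList (some ((d + 1 : Nat) : Int)) none)]
        else result) result by
    exact h list [] hpre
  intro l
  induction l with
  | nil => intro result _; rfl
  | cons piece rest ih =>
    intro result hl
    simp only [List.foldl_cons]
    rw [← dbo_piece_eq val.toList piece.toList (hl piece (by simp)) result]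
    exact ih _ (fun q hq => hl q (by simp [hq]))

-- ===== VERDICT (by name: the statement is the Claim_ definition above) =====
theorem differentByOne_spec : Claim_equal_differentByOne := by
  intro val list _ hpre
  exact dbo_eq val list hpre
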